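-- pv_equiv track=rewrite | github.com/j-schectman/advent-2024 | day_5/day_5/utils.py | is_page_update_valid
-- ===== SOURCE A (Python) =====
-- def is_page_update_valid(rules: dict[int, set[int]], updates: list[int]) -> bool:
--     updated_pages: set[int] = set()
--     for page in updates:
--         after_pages = rules.get(page)
--         if after_pages and len(updated_pages & after_pages) > 0:
--             return False
--
--         updated_pages.add(page)
--
--     return True
-- ===== SOURCE B (Python) =====
-- def is_page_update_valid(rules: dict[int, set[int]], updates: list[int]) -> bool:
--     firstidx: dict[int, int] = {}
--     for i, page in enumerate(updates):
--         firstidx.setdefault(page, i)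
--     for i, page in enumerate(updates):
--         for q in rules.get(page) or ():
--             if q in firstidx and firstidx[q] < i:
--                 return False
--     return True
-- ===== Notes on version B (the rewrite author's own statement) =====
-- stated objective: alternative
-- what changed: Replaces A's incrementally grown seen-set intersected with each rule set by a first-occurrence index table built in one up-front pass and queried per rule entry against the current position.
import Mathlib
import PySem

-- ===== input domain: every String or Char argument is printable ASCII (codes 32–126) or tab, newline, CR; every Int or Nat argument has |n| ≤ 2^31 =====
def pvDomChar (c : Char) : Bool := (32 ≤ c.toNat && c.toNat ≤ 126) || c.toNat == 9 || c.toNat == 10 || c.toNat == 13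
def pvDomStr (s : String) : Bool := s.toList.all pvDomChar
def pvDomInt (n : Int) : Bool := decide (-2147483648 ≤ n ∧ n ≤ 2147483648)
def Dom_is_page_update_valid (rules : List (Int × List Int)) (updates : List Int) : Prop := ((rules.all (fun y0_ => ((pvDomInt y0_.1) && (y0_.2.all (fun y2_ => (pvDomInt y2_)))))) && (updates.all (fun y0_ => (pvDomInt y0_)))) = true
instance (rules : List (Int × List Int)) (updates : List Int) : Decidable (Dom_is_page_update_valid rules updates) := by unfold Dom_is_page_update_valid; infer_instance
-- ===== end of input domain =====

-- B replaces A's running seen-set (built as the loop goes, intersected with each rule set)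
-- by a first-occurrence position table built in one pass up front and then queried per rule
-- entry; objective: alternative decomposition, same asymptotic cost.

-- ===== PORT A =====
-- for page in updates: if rules.get(page) and len(updated_pages & after_pages) > 0: return False
def pvALoop (rules : List (Int × List Int)) : List Int → PySem.Set Int → Bool
  | [], _ => true
  | page :: rest, updated_pages =>
    match (PySem.Dict.mk rules).get? page with
    | some after_pages =>
        if after_pages ≠ [] ∧ 0 < PySem.Set.len (PySem.Set.inter updated_pages after_pages)
        then false
        else pvALoop rules rest (PySem.Set.add updated_pages page)
    | none => pvALoop rules rest (PySem.Set.add updated_pages page)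

def is_page_update_valid (rules : List (Int × List Int)) (updates : List Int) : Bool :=
  pvALoop rules updates PySem.Set.empty

-- ===== PORT B =====
-- firstidx = {}; for i, page in enumerate(updates): firstidx.setdefault(page, i)
def pvFirstIdx (updates : List Int) : PySem.Dict Int Int :=
  (PySem.List.enumerate updates).foldl (fun d p => d.setdefault p.2 p.1) PySem.Dict.empty

-- for i, page in enumerate(updates): for q in rules.get(page) or (): if q in firstidx and firstidx[q] < i: return False
def pvBLoop (rules : List (Int × List Int)) (first : PySem.Dict Int Int) : List (Int × Int) → Bool
  | [] => true
  | (i, page) :: rest =>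
    if (((PySem.Dict.mk rules).get? page).getD []).any
         (fun q => first.contains q && decide (first.getD q 0 < i))
    then false
    else pvBLoop rules first rest

def is_page_update_valid_alt (rules : List (Int × List Int)) (updates : List Int) : Bool :=
  pvBLoop rules (pvFirstIdx updates) (PySem.List.enumerate updates)

-- ===== PRECONDITION & SPEC =====
def Spec_is_page_update_valid (rules : List (Int × List Int)) (updates : List Int) (out : Bool) : Prop := out = is_page_update_valid_alt rules updates
instance (rules : List (Int × List Int)) (updates : List Int) (out : Bool) : Decidable (Spec_is_page_update_valid rules updates out) := by unfold Spec_is_page_update_valid; infer_instance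

-- ===== CLAIM (what is proved, stated in full; the proofs are below) =====
def Claim_equal_is_page_update_valid : Prop := ∀ (rules : List (Int × List Int)) (updates : List Int), Dom_is_page_update_valid rules updates → Spec_is_page_update_valid rules updates (is_page_update_valid rules updates)

-- ===== LEMMAS AND PROOFS =====

-- the setdefault fold records, for each key, the index of its FIRST occurrence
theorem pvFirstIdx_fold_get (l : List Int) : ∀ (n : Int) (d : PySem.Dict Int Int) (q : Int),
    ((PySem.List.enumerate l n).foldl (fun d p => d.setdefault p.2 p.1) d).get? q =
      (match d.get? q with
       | some v => some v
       | none => if q ∈ l then some (n + (l.idxOf q : Int)) else none) := by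
  induction l with
  | nil =>
      intro n d q
      simp only [PySem.List.enumerate_nil, List.foldl_nil]
      cases d.get? q <;> simp
  | cons x xs ih =>
      intro n d q
      rw [PySem.List.enumerate_cons]
      simp only [List.foldl_cons]
      rw [ih (n + 1) (d.setdefault x n) q]
      by_cases hqx : q = x
      · subst hqx
        rw [PySem.Dict.get?_setdefault_self]
        cases hd : d.get? q <;> simp [List.idxOf_cons_self]
      · rw [PySem.Dict.get?_setdefault_of_ne _ _ hqx]
        cases hd : d.get? q
        · simp only [List.mem_cons, hqx, false_or]
          have hidx : (x :: xs).idxOf q = xs.idxOf q + 1 := by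
            simp [Ne.symm hqx]
          rw [hidx]
          split_ifs with hmem
          · congr 1
            push_cast
            ring
          · rfl
        · rfl

theorem pvFirstIdx_get (updates : List Int) (q : Int) :
    (pvFirstIdx updates).get? q = if q ∈ updates then some ((updates.idxOf q : Int)) else none := by
  unfold pvFirstIdx
  rw [pvFirstIdx_fold_get updates 0 PySem.Dict.empty q]
  simp [PySem.Dict.get?_empty]

theorem mem_take_iff_idxOf_lt (l : List Int) (q : Int) : ∀ (i : Nat),
    q ∈ l.take i ↔ q ∈ l ∧ l.idxOf q < i := by
  induction l with
  | nil => intro i; simp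
  | cons x xs ih =>
      intro i
      cases i with
      | zero => simp
      | succ j =>
          by_cases hqx : q = x
          · subst hqx; simp [List.idxOf_cons_self]
          · have hidx : (x :: xs).idxOf q = xs.idxOf q + 1 := by
              simp [Ne.symm hqx]
            rw [List.take_succ_cons]
            simp only [List.mem_cons, hqx, false_or, hidx, ih j]
            constructor
            · rintro ⟨h1, h2⟩; exact ⟨h1, by omega⟩
            · rintro ⟨h1, h2⟩; exact ⟨h1, by omega⟩

-- the per-entry test B performs equals "q has already occurred before position i"
theorem pvB_test (full : List Int) (q : Int) (i : Nat) :
    ((pvFirstIdx full).contains q && decide ((pvFirstIdx full).getD q 0 < (i : Int)))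
      = decide (q ∈ full.take i) := by
  rw [PySem.Dict.contains_eq_isSome_get?, PySem.Dict.getD_eq_get?_getD, pvFirstIdx_get]
  by_cases hq : q ∈ full
  · simp only [hq, if_true, Option.isSome_some, Option.getD_some, Bool.true_and,
      mem_take_iff_idxOf_lt full q i, true_and]
    by_cases h : full.idxOf q < i
    · have h' : (full.idxOf q : Int) < (i : Int) := by exact_mod_cast h
      simp [h, h']
    · have h' : ¬ ((full.idxOf q : Int) < (i : Int)) := by exact_mod_cast h
      simp [h, h']
  · simp [hq, mem_take_iff_idxOf_lt full q i]

-- main loop correspondence: A over the suffix with the prefix as seen-set equals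
-- B over the enumerated suffix querying the first-occurrence table of the whole list
theorem pv_loop_eq (rules : List (Int × List Int)) : ∀ (l pre : List Int),
    pvALoop rules l (PySem.Set.ofList pre)
      = pvBLoop rules (pvFirstIdx (pre ++ l)) (PySem.List.enumerate l (pre.length : Int)) := by
  intro l
  induction l with
  | nil => intro pre; simp [pvALoop, pvBLoop, PySem.List.enumerate_nil]
  | cons page rest ih =>
      intro pre
      have hrec :
          pvALoop rules rest (PySem.Set.add (PySem.Set.ofList pre) page)
            = pvBLoop rules (pvFirstIdx (pre ++ page :: rest))
                (PySem.List.enumerate rest ((pre.length : Int) + 1)) := by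
        have h1 : pre ++ page :: rest = (pre ++ [page]) ++ rest := by simp
        have h2 : ((pre.length : Int) + 1) = (((pre ++ [page]).length : Nat) : Int) := by
          simp only [List.length_append, List.length_singleton]
          push_cast
          ring
        rw [← PySem.Set.ofList_append_singleton, h1, h2, ih (pre ++ [page])]
      have htest : ∀ q : Int,
          ((pvFirstIdx (pre ++ page :: rest)).contains q &&
            decide ((pvFirstIdx (pre ++ page :: rest)).getD q 0 < (pre.length : Int)))
          = decide (q ∈ pre) := by
        intro q
        rw [pvB_test (pre ++ page :: rest) q pre.length, List.take_left]
      rw [PySem.List.enumerate_cons]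
      unfold pvALoop pvBLoop
      cases hg : (PySem.Dict.mk rules).get? page with
      | none =>
          simp only [Option.getD_none, List.any_nil, Bool.false_eq_true, if_false]
          exact hrec
      | some after =>
          simp only [Option.getD_some]
          have ha : (after ≠ [] ∧
                0 < PySem.Set.len (PySem.Set.inter (PySem.Set.ofList pre) after))
              ↔ ∃ q ∈ after, q ∈ pre := by
            constructor
            · rintro ⟨-, hlen⟩
              have hne : PySem.Set.inter (PySem.Set.ofList pre) after ≠ [] := by
                intro hnil
                rw [PySem.Set.len, hnil] at hlen
                simp at hlen
              obtain ⟨x, hx⟩ := List.exists_mem_of_ne_nil _ hne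
              rw [PySem.Set.mem_inter, PySem.Set.mem_ofList] at hx
              exact ⟨x, hx.2, hx.1⟩
            · rintro ⟨q, hqa, hqp⟩
              refine ⟨by rintro rfl; simp at hqa, ?_⟩
              have hmem : q ∈ PySem.Set.inter (PySem.Set.ofList pre) after := by
                rw [PySem.Set.mem_inter, PySem.Set.mem_ofList]; exact ⟨hqp, hqa⟩
              rw [PySem.Set.len]
              exact_mod_cast List.length_pos_of_mem hmem
          by_cases h : ∃ q ∈ after, q ∈ pre
          · have hB : (after.any fun q =>
                  (pvFirstIdx (pre ++ page :: rest)).contains q &&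
                    decide ((pvFirstIdx (pre ++ page :: rest)).getD q 0 < (pre.length : Int)))
                = true := by
              obtain ⟨q, hqa, hqp⟩ := h
              refine List.any_eq_true.mpr ⟨q, hqa, ?_⟩
              rw [htest q]
              simpa using hqp
            rw [if_pos (ha.mpr h), if_pos hB]
          · have hB : (after.any fun q =>
                  (pvFirstIdx (pre ++ page :: rest)).contains q &&
                    decide ((pvFirstIdx (pre ++ page :: rest)).getD q 0 < (pre.length : Int)))
                = false := by
              refine List.any_eq_false.mpr ?_
              intro q hq
              rw [htest q]
              simpa using fun hqp => h ⟨q, hq, hqp⟩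
            rw [if_neg (fun hc => h (ha.mp hc)), if_neg (by rw [hB]; simp)]
            exact hrec

-- ===== VERDICT (by name: the statement is the Claim_ definition above) =====
theorem is_page_update_valid_spec : Claim_equal_is_page_update_valid := by
  intro rules updates _
  show is_page_update_valid rules updates = is_page_update_valid_alt rules updates
  unfold is_page_update_valid is_page_update_valid_alt
  have h := pv_loop_eq rules updates []
  simp only [List.nil_append, List.length_nil, Nat.cast_zero] at h
  exact h
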